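-- pv_equiv track=rewrite | github.com/HwangChulHee/nietzche-sllm-project | ml/v2_pipeline/english_chunker_ti.py | find_body_range
-- ===== SOURCE A (Python) =====
-- BODY_START_MARKER = "MAXIMS AND MISSILES"
--
-- BODY_END_MARKER = "THE ANTICHRIST"
--
-- TOC_GUARD = 200
--
-- def find_body_range(lines):
--     """본편 시작/종료 라인 찾기. TOC 영역 무시."""
--     start, end = None, len(lines)
--     for i, line in enumerate(lines):
--         if i < TOC_GUARD:
--             continue
--         s = line.strip()
--         if start is None and s == BODY_START_MARKER:
--             start = i
--         elif start is not None and s == BODY_END_MARKER: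
--             end = i
--             break
--     return start, end
-- ===== SOURCE B (Python) =====
-- BODY_START_MARKER = "MAXIMS AND MISSILES"
--
-- BODY_END_MARKER = "THE ANTICHRIST"
--
-- TOC_GUARD = 200
--
-- def find_body_range(lines):
--     """Build an occurrence index of both markers in one pass, then select
--     start/end by pure position arithmetic on those index lists."""
--     starts = []
--     ends = []
--     for i, line in enumerate(lines):
--         s = line.strip()
--         if s == BODY_START_MARKER:
--             starts.append(i)
--         elif s == BODY_END_MARKER:
--             ends.append(i)
--     start = next((i for i in starts if i >= TOC_GUARD), None)
--     if start is None:
--         return None, len(lines)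
--     end = next((j for j in ends if j > start), len(lines))
--     return start, end
-- ===== Notes on version B (the rewrite author's own statement) =====
-- stated objective: alternative
-- what changed: Instead of a stateful marker-driven scan, B builds an occurrence index of both markers (all their line positions) in one pass and then selects start = first start-position >= TOC_GUARD and end = first end-position > start by pure selection over those position lists.
import Mathlib
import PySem

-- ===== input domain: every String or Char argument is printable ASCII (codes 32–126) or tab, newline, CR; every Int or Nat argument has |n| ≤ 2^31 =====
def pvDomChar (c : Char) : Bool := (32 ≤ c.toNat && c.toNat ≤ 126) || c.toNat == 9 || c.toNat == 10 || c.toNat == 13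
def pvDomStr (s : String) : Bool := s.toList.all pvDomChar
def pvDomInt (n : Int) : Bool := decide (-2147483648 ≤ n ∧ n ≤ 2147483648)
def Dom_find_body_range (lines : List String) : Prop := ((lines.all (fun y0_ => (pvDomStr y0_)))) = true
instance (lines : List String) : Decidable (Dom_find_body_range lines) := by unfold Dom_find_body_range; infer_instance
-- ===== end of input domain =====

-- B replaces A's stateful marker-driven scan by an occurrence index: one pass
-- collects every position of each marker, then start/end are selected from those
-- position lists (objective: alternative; same return value on every input).

-- ===== PORT A =====
-- A's single for-loop with state (start, end) and a break, as structural recursion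
-- over the remaining lines with the running index i.
def pvLoopA : List String → Int → Option Int → Int → Option Int × Int
  | [], _, start, e => (start, e)
  | line :: rest, i, start, e =>
    if i < 200 then pvLoopA rest (i + 1) start e
    else
      let s := PySem.Str.strip line
      if start = none ∧ s = "MAXIMS AND MISSILES" then pvLoopA rest (i + 1) (some i) e
      else if start ≠ none ∧ s = "THE ANTICHRIST" then (start, i)
      else pvLoopA rest (i + 1) start e

def find_body_range (lines : List String) : Option Int × Int :=
  pvLoopA lines 0 none (lines.length : Int)

-- ===== PORT B =====
-- indexing pass: positions of each marker (Source B's starts/ends lists)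
def pvIndex : List String → Int → List Int × List Int
  | [], _ => ([], [])
  | line :: rest, i =>
    let (st, en) := pvIndex rest (i + 1)
    let s := PySem.Str.strip line
    if s = "MAXIMS AND MISSILES" then (i :: st, en)
    else if s = "THE ANTICHRIST" then (st, i :: en)
    else (st, en)

-- next((i for i in starts if i >= TOC_GUARD), None)
def pvFirstGe : List Int → Option Int
  | [] => none
  | x :: xs => if 200 ≤ x then some x else pvFirstGe xs

-- next((j for j in ends if j > start), len(lines))
def pvFirstGt : List Int → Int → Int → Int
  | [], _, d => d
  | x :: xs, st, d => if st < x then x else pvFirstGt xs st d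

def find_body_range_alt (lines : List String) : Option Int × Int :=
  let idx := pvIndex lines 0
  match pvFirstGe idx.1 with
  | none => (none, (lines.length : Int))
  | some st => (some st, pvFirstGt idx.2 st (lines.length : Int))

-- ===== PRECONDITION & SPEC =====
def Spec_find_body_range (lines : List String) (out : Option Int × Int) : Prop := out = find_body_range_alt lines
instance (lines : List String) (out : Option Int × Int) : Decidable (Spec_find_body_range lines out) := by unfold Spec_find_body_range; infer_instance

-- ===== CLAIM (what is proved, stated in full; the proofs are below) =====
def Claim_equal_find_body_range : Prop := ∀ (lines : List String), Dom_find_body_range lines → Spec_find_body_range lines (find_body_range lines)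

-- ===== LEMMAS AND PROOFS =====

theorem pvIndex_starts_ge : ∀ (l : List String) (i st : Int),
    pvFirstGe (pvIndex l i).1 = some st → i ≤ st := by
  intro l
  induction l with
  | nil => intro i st h; simp [pvIndex, pvFirstGe] at h
  | cons line rest ih =>
    intro i st h
    simp only [pvIndex] at h
    split at h
    · simp only [pvFirstGe] at h
      split at h
      · injection h with h; omega
      · have := ih (i + 1) st h; omega
    · split at h
      · have := ih (i + 1) st h; omega
      · have := ih (i + 1) st h; omega

-- once A's start is set at index st < i, the rest of the loop selects the first
-- end-marker position > st from B's ends list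
theorem pvLoopA_some : ∀ (l : List String) (i : Int), 200 ≤ i → ∀ (st e : Int), st < i →
    pvLoopA l i (some st) e = (some st, pvFirstGt (pvIndex l i).2 st e) := by
  intro l
  induction l with
  | nil => intro i _ st e _; simp [pvLoopA, pvIndex, pvFirstGt]
  | cons line rest ih =>
    intro i hi st e hst
    have hne : ("MAXIMS AND MISSILES" : String) ≠ "THE ANTICHRIST" := by decide
    by_cases hE : PySem.Str.strip line = "THE ANTICHRIST"
    · have hS : ¬ PySem.Str.strip line = "MAXIMS AND MISSILES" := by
        rw [hE]; exact fun h => hne h.symm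
      have hidx : (pvIndex (line :: rest) i).2 = i :: (pvIndex rest (i + 1)).2 := by
        simp [pvIndex, hS, hE]
      have hstep : pvLoopA (line :: rest) i (some st) e = (some st, i) := by
        simp [pvLoopA, if_neg (show ¬ i < 200 by omega), hS, hE]
      rw [hstep, hidx]
      simp [pvFirstGt, hst]
    · have hidx : (pvIndex (line :: rest) i).2 = (pvIndex rest (i + 1)).2 := by
        by_cases hS : PySem.Str.strip line = "MAXIMS AND MISSILES" <;> simp [pvIndex, hS, hE]
      have hstep : pvLoopA (line :: rest) i (some st) e = pvLoopA rest (i + 1) (some st) e := by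
        by_cases hS : PySem.Str.strip line = "MAXIMS AND MISSILES" <;>
          simp [pvLoopA, if_neg (show ¬ i < 200 by omega), hS, hE]
      rw [hstep, hidx, ih (i + 1) (by omega) st e (by omega)]

theorem pvLoopA_none : ∀ (l : List String) (i : Int), 0 ≤ i → ∀ (e : Int),
    pvLoopA l i none e =
      match pvFirstGe (pvIndex l i).1 with
      | none => (none, e)
      | some st => (some st, pvFirstGt (pvIndex l i).2 st e) := by
  intro l
  induction l with
  | nil => intro i _ e; simp [pvLoopA, pvIndex, pvFirstGe]
  | cons line rest ih =>
    intro i hi e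
    by_cases hS : PySem.Str.strip line = "MAXIMS AND MISSILES"
    all_goals by_cases hE : PySem.Str.strip line = "THE ANTICHRIST"
    · exfalso; rw [hS] at hE; exact absurd hE (by decide)
    · -- start marker line
      have hidx : pvIndex (line :: rest) i = (i :: (pvIndex rest (i+1)).1, (pvIndex rest (i+1)).2) := by
        simp [pvIndex, hS]
      by_cases h200 : i < 200
      · have hstep : pvLoopA (line :: rest) i none e = pvLoopA rest (i + 1) none e := by
          simp [pvLoopA, if_pos h200]
        rw [hstep, ih (i + 1) (by omega) e, hidx]
        have hge : pvFirstGe (i :: (pvIndex rest (i+1)).1) = pvFirstGe (pvIndex rest (i+1)).1 := by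
          simp only [pvFirstGe]
          rw [if_neg (show ¬ (200:Int) ≤ i by omega)]
        rw [hge]
      · have hstep : pvLoopA (line :: rest) i none e = pvLoopA rest (i + 1) (some i) e := by
          simp [pvLoopA, if_neg h200, hS]
        rw [hstep, pvLoopA_some rest (i + 1) (by omega) i e (by omega), hidx]
        have hge : pvFirstGe (i :: (pvIndex rest (i+1)).1) = some i := by
          simp only [pvFirstGe]
          rw [if_pos (show (200:Int) ≤ i by omega)]
        rw [hge]
    · -- end marker line
      have hidx : pvIndex (line :: rest) i = ((pvIndex rest (i+1)).1, i :: (pvIndex rest (i+1)).2) := by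
        simp [pvIndex, hS, hE]
      have hstep : pvLoopA (line :: rest) i none e = pvLoopA rest (i + 1) none e := by
        by_cases h200 : i < 200
        · simp [pvLoopA, if_pos h200]
        · simp [pvLoopA, if_neg h200, hS]
      rw [hstep, ih (i + 1) (by omega) e, hidx]
      cases hst : pvFirstGe (pvIndex rest (i+1)).1 with
      | none => rfl
      | some st =>
        have hge := pvIndex_starts_ge rest (i + 1) st hst
        simp only [pvFirstGt, if_neg (by omega : ¬ st < i)]
    · -- ordinary line
      have hidx : pvIndex (line :: rest) i = pvIndex rest (i+1) := by
        simp [pvIndex, hS, hE]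
      have hstep : pvLoopA (line :: rest) i none e = pvLoopA rest (i + 1) none e := by
        by_cases h200 : i < 200
        · simp [pvLoopA, if_pos h200]
        · simp [pvLoopA, if_neg h200, hS, hE]
      rw [hstep, ih (i + 1) (by omega) e, hidx]

-- ===== VERDICT (by name: the statement is the Claim_ definition above) =====
theorem find_body_range_spec : Claim_equal_find_body_range := by
  intro lines _
  unfold Spec_find_body_range find_body_range find_body_range_alt
  rw [pvLoopA_none lines 0 le_rfl (lines.length : Int)]
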